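-- pv_equiv track=rewrite | github.com/robo919/ML_BASED_PH | src/ultra_feature_extractor.py | _count_consonant_clusters
-- ===== SOURCE A (Python) =====
-- def _count_consonant_clusters(text: str) -> int:
--     """Count consonant clusters (3+ consonants in a row)"""
--     vowels = set('aeiou')
--     count = 0
--     current = 0
--     for char in text.lower():
--         if char.isalpha() and char not in vowels:
--             current += 1
--             if current >= 3:
--                 count += 1
--         else:
--             current = 0
--     return count
-- ===== SOURCE B (Python) =====
-- def _count_consonant_clusters(text: str) -> int:
--     """Count consonant clusters (3+ consonants in a row)"""
--     vowels = set('aeiou')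
--
--     def is_cons(c):
--         return c.isalpha() and c not in vowels
--
--     lowered = text.lower()
--     total = 0
--     i, n = 0, len(lowered)
--     while i < n:
--         if is_cons(lowered[i]):
--             j = i + 1
--             while j < n and is_cons(lowered[j]):
--                 j += 1
--             total += max(0, (j - i) - 2)
--             i = j
--         else:
--             i += 1
--     return total
-- ===== Notes on version B (the rewrite author's own statement) =====
-- stated objective: alternative
-- what changed: B replaces A's per-character running counter (incrementing and testing current >= 3 on every consonant) with a run-based two-pointer scan that finds each maximal consonant run and adds the closed form max(0, run_len - 2) once per run.
import Mathlib
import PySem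

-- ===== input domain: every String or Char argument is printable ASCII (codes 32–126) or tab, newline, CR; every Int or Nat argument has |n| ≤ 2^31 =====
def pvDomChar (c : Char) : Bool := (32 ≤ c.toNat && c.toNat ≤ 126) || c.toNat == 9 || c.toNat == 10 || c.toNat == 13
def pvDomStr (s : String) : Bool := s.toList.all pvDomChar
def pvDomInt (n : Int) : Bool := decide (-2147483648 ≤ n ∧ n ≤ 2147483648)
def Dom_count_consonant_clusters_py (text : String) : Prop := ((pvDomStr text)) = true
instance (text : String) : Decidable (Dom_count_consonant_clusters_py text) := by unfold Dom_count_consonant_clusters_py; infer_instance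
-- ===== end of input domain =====

-- B replaces A's per-character running counter with a run-based scan adding max(0, run_len - 2) per maximal consonant run (alternative decomposition, same cost).

-- ===== PORT A =====
def count_consonant_clusters_py (text : String) : Int :=
  let vowels : PySem.Set Char := PySem.Set.ofList ['a', 'e', 'i', 'o', 'u']
  let r : Int × Int := (PySem.Str.lower text).toList.foldl
    (fun (st : Int × Int) char =>
      if PySem.Chars.isalpha char && !(PySem.Set.contains vowels char) then
        let current := st.2 + 1
        (if current ≥ 3 then st.1 + 1 else st.1, current)
      else (st.1, 0)) (0, 0)
  r.1

-- ===== PORT B =====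
-- Source B's is_cons helper
def pvIsCons (c : Char) : Bool :=
  PySem.Chars.isalpha c && !(PySem.Set.contains (PySem.Set.ofList ['a', 'e', 'i', 'o', 'u']) c)

-- Source B's outer while loop: at a consonant, the inner while advances j to the end of
-- the maximal run (takeWhile/dropWhile), adding max(0, run_len - 2); else step one char.
def pvRunScan : List Char → Int
  | [] => 0
  | c :: cs =>
    if pvIsCons c then
      max 0 ((1 + (cs.takeWhile pvIsCons).length : Int) - 2) + pvRunScan (cs.dropWhile pvIsCons)
    else
      pvRunScan cs
  termination_by l => l.length
  decreasing_by
    · have := List.length_dropWhile_le pvIsCons cs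
      simp; omega
    · simp

def count_consonant_clusters_py_alt (text : String) : Int :=
  pvRunScan (PySem.Str.lower text).toList

-- ===== PRECONDITION & SPEC =====
def Spec_count_consonant_clusters_py (text : String) (out : Int) : Prop := out = count_consonant_clusters_py_alt text
instance (text : String) (out : Int) : Decidable (Spec_count_consonant_clusters_py text out) := by unfold Spec_count_consonant_clusters_py; infer_instance

-- ===== CLAIM (what is proved, stated in full; the proofs are below) =====
def Claim_equal_count_consonant_clusters_py : Prop := ∀ (text : String), Dom_count_consonant_clusters_py text → Spec_count_consonant_clusters_py text (count_consonant_clusters_py text)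

-- ===== LEMMAS AND PROOFS =====

-- A's loop body as a named step function (proof helper)
def pvStepA (st : Int × Int) (char : Char) : Int × Int :=
  if pvIsCons char then
    (if st.2 + 1 ≥ 3 then st.1 + 1 else st.1, st.2 + 1)
  else (st.1, 0)

theorem pvA_eq_foldl (text : String) :
    count_consonant_clusters_py text
      = (((PySem.Str.lower text).toList).foldl pvStepA (0, 0)).1 := rfl

-- folding A's step over a block of consonants
theorem pvFoldl_cons_run (l : List Char) (hl : ∀ d ∈ l, pvIsCons d = true) :
    ∀ (count cur : Int), 0 ≤ cur →
      List.foldl pvStepA (count, cur) l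
        = (count + (max 0 (cur + l.length - 2) - max 0 (cur - 2)), cur + l.length) := by
  induction l with
  | nil => intro count cur h; simp
  | cons d t ih =>
    intro count cur h
    have hd : pvIsCons d = true := hl d (by simp)
    have ht : ∀ x ∈ t, pvIsCons x = true := fun x hx => hl x (by simp [hx])
    simp only [List.foldl_cons, pvStepA, hd, if_pos]
    rw [ih ht _ (cur + 1) (by omega)]
    simp only [Prod.mk.injEq, List.length_cons]
    refine ⟨?_, by push_cast; omega⟩
    split_ifs <;> push_cast <;> omega

theorem pvScan_cons (c : Char) (cs : List Char) :
    pvRunScan (c :: cs)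
      = if pvIsCons c then
          max 0 ((1 + (cs.takeWhile pvIsCons).length : Int) - 2) + pvRunScan (cs.dropWhile pvIsCons)
        else pvRunScan cs := by
  rw [pvRunScan.eq_def]

theorem pvMain : ∀ (n : Nat) (l : List Char), l.length ≤ n → ∀ (count : Int),
    (List.foldl pvStepA (count, 0) l).1 = count + pvRunScan l := by
  intro n
  induction n with
  | zero =>
    intro l hl count
    have : l = [] := List.eq_nil_of_length_eq_zero (Nat.le_zero.mp hl)
    subst this; simp [pvRunScan]
  | succ n ih =>
    intro l hl count
    match l with
    | [] => simp [pvRunScan]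
    | c :: cs =>
      have hcs : cs.length ≤ n := by
        simpa using Nat.lt_succ_iff.mp (Nat.lt_of_lt_of_le (by simp) hl)
      rw [pvScan_cons]
      by_cases h : pvIsCons c = true
      · rw [if_pos h]
        have hsplit : c :: cs = (c :: cs.takeWhile pvIsCons) ++ cs.dropWhile pvIsCons := by
          simp [List.takeWhile_append_dropWhile]
        rw [hsplit, List.foldl_append]
        have hrun : ∀ d ∈ c :: cs.takeWhile pvIsCons, pvIsCons d = true := by
          intro d hd
          rcases hd with _ | hd
          · exact h
          · exact List.mem_takeWhile_imp (by assumption)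
        rw [pvFoldl_cons_run _ hrun count 0 le_rfl]
        have hlen : (cs.dropWhile pvIsCons).length ≤ cs.length := List.length_dropWhile_le _ _
        rcases hdrop : cs.dropWhile pvIsCons with _ | ⟨d, ds⟩
        · simp [pvRunScan]
          omega
        · have hdfalse : pvIsCons d = false := by
            have := List.head?_dropWhile_not pvIsCons cs
            rw [hdrop] at this; simpa using this
          simp only [List.foldl_cons, pvStepA, hdfalse, Bool.false_eq_true, if_false]
          have hds : ds.length ≤ n := by
            rw [hdrop] at hlen; simp at hlen; omega
          rw [ih ds hds]
          rw [pvScan_cons, if_neg (by simp [hdfalse])]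
          simp only [List.length_cons]; push_cast; omega
      · rw [if_neg h, Bool.not_eq_true] at *
        simp only [List.foldl_cons, pvStepA, h, Bool.false_eq_true, if_false]
        exact ih cs hcs count

-- ===== VERDICT (by name: the statement is the Claim_ definition above) =====
theorem count_consonant_clusters_py_spec : Claim_equal_count_consonant_clusters_py := by
  intro text _
  unfold Spec_count_consonant_clusters_py count_consonant_clusters_py_alt
  rw [pvA_eq_foldl]
  simpa using pvMain (PySem.Str.lower text).toList.length _ le_rfl 0
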